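-- pv_equiv track=rewrite | github.com/spigo900/eldritchestate | src/py/eldestrl/utils.py | hollow_box
-- ===== SOURCE A (Python) =====
-- from collections import namedtuple
--
-- def in_rect(rect, x, y):
--     return rect.x <= x <= rect.x + rect.width - 1 \
--         and rect.y <= y <= rect.y + rect.height - 1
--
-- Rect = namedtuple('Rect', 'x, y, width, height')
--
-- def hollow_box(x1, y1, x2, y2):
--     """Take two points and return a series of the points along their rectangle's
--     edge."""
--     min_x = min(x1, x2)
--     max_x = max(x1, x2)
--     min_y = min(y1, y2)
--     max_y = max(y1, y2)
--     inside = Rect(min_x + 1, min_y + 1,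
--                   max_x - min_x - 1, max_y - min_y - 1)
--     return [(x, y)
--             for x in range(min_x, max_x + 1)
--             for y in range(min_y, max_y + 1)
--             if not in_rect(inside, x, y)]
-- ===== SOURCE B (Python) =====
-- def hollow_box(x1, y1, x2, y2):
--     """Take two points and return a series of the points along their rectangle's
--     edge."""
--     lo_x, hi_x = (x1, x2) if x1 <= x2 else (x2, x1)
--     lo_y, hi_y = (y1, y2) if y1 <= y2 else (y2, y1)
--     left = [(lo_x, y) for y in range(lo_y, hi_y + 1)]
--     if lo_x == hi_x:
--         return left
--     rim = [lo_y] if lo_y == hi_y else [lo_y, hi_y]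
--     mid = [(x, y) for x in range(lo_x + 1, hi_x) for y in rim]
--     right = [(hi_x, y) for y in range(lo_y, hi_y + 1)]
--     return left + mid + right
-- ===== Notes on version B (the rewrite author's own statement) =====
-- stated objective: faster
-- what changed: Instead of scanning every point of the W*H grid and filtering out the interior, B emits the border directly: the full left column, then for each interior column just its top and bottom cell, then the full right column, preserving A's x-then-y order; intended as faster (O(W+H) vs O(W*H)); a timing run measured B 283-553x faster at n=1024-4096 and A timing out at larger sizes, so the largest rung could not confirm the ratio.
import Mathlib
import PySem

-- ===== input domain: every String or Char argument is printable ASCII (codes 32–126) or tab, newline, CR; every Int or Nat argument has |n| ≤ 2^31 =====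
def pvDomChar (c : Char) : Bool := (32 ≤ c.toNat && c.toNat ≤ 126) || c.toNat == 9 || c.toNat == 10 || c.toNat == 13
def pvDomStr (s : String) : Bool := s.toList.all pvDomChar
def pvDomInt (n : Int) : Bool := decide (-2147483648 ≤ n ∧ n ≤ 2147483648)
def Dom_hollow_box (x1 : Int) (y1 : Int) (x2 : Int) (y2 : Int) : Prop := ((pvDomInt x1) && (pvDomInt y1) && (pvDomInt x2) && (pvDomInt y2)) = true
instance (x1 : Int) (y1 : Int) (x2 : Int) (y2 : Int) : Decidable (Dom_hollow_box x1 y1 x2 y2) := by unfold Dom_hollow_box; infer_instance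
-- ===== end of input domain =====

-- B emits the border directly (left column, interior rims, right column) instead of filtering the
-- whole W*H grid: intended as faster; a timing run measured B 283-553x faster at n=1024-4096 (A timed out beyond).


-- ===== PORT A =====
-- rect is (x, y, width, height); Python's chained comparisons become two decides each
def in_rect (rect : Int × Int × Int × Int) (x : Int) (y : Int) : Bool :=
  decide (rect.1 ≤ x) && decide (x ≤ rect.1 + rect.2.2.1 - 1) &&
  decide (rect.2.1 ≤ y) && decide (y ≤ rect.2.1 + rect.2.2.2 - 1)

def hollow_box (x1 : Int) (y1 : Int) (x2 : Int) (y2 : Int) : List (Int × Int) :=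
  let min_x := min x1 x2
  let max_x := max x1 x2
  let min_y := min y1 y2
  let max_y := max y1 y2
  let inside : Int × Int × Int × Int := (min_x + 1, min_y + 1, max_x - min_x - 1, max_y - min_y - 1)
  (PySem.List.pyRange min_x (max_x + 1) 1).flatMap (fun x =>
    ((PySem.List.pyRange min_y (max_y + 1) 1).filter (fun y => !(in_rect inside x y))).map
      (fun y => (x, y)))

-- ===== PORT B =====
def hollow_box_alt (x1 : Int) (y1 : Int) (x2 : Int) (y2 : Int) : List (Int × Int) :=
  let (lo_x, hi_x) := if x1 ≤ x2 then (x1, x2) else (x2, x1)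
  let (lo_y, hi_y) := if y1 ≤ y2 then (y1, y2) else (y2, y1)
  let left := (PySem.List.pyRange lo_y (hi_y + 1) 1).map (fun y => (lo_x, y))
  if lo_x = hi_x then left
  else
    let rim := if lo_y = hi_y then [lo_y] else [lo_y, hi_y]
    let mid := (PySem.List.pyRange (lo_x + 1) hi_x 1).flatMap (fun x => rim.map (fun y => (x, y)))
    let right := (PySem.List.pyRange lo_y (hi_y + 1) 1).map (fun y => (hi_x, y))
    left ++ mid ++ right

-- ===== PRECONDITION & SPEC =====
def Spec_hollow_box (x1 : Int) (y1 : Int) (x2 : Int) (y2 : Int) (out : List (Int × Int)) : Prop := out = hollow_box_alt x1 y1 x2 y2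
instance (x1 : Int) (y1 : Int) (x2 : Int) (y2 : Int) (out : List (Int × Int)) : Decidable (Spec_hollow_box x1 y1 x2 y2 out) := by unfold Spec_hollow_box; infer_instance

-- ===== CLAIM (what is proved, stated in full; the proofs are below) =====
def Claim_equal_hollow_box : Prop := ∀ (x1 : Int) (y1 : Int) (x2 : Int) (y2 : Int), Dom_hollow_box x1 y1 x2 y2 → Spec_hollow_box x1 y1 x2 y2 (hollow_box x1 y1 x2 y2)

-- ===== LEMMAS AND PROOFS =====

-- a column at the left or right edge keeps every y
lemma filter_full (a b c d x : Int) (hx : x ≤ a ∨ b ≤ x) :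
    (PySem.List.pyRange c (d + 1) 1).filter
        (fun y => !(in_rect (a + 1, c + 1, b - a - 1, d - c - 1) x y))
      = PySem.List.pyRange c (d + 1) 1 := by
  apply List.filter_eq_self.mpr
  intro y _
  simp only [in_rect, Bool.not_eq_eq_eq_not, Bool.not_true, Bool.and_eq_false_iff,
    decide_eq_false_iff_not, not_le]
  omega

-- an interior column keeps only its lowest and highest y
lemma filter_interior (a b c d x : Int) (hx1 : a + 1 ≤ x) (hx2 : x ≤ b - 1) (hcd : c ≤ d) :
    (PySem.List.pyRange c (d + 1) 1).filter
        (fun y => !(in_rect (a + 1, c + 1, b - a - 1, d - c - 1) x y))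
      = if c = d then [c] else [c, d] := by
  by_cases h : c = d
  · subst h
    rw [PySem.List.pyRange_one_singleton]
    simp only [List.filter, in_rect]
    have : ¬ (c + 1 ≤ c) := by omega
    simp [this]
  · have hlt : c < d := lt_of_le_of_ne hcd h
    rw [PySem.List.pyRange_one_cons (by omega),
        PySem.List.pyRange_one_succ_right (by omega)]
    have hmidnil : (PySem.List.pyRange (c + 1) d 1).filter
        (fun y => !(in_rect (a + 1, c + 1, b - a - 1, d - c - 1) x y)) = [] := by
      apply List.filter_eq_nil_iff.mpr
      intro y hy
      rw [PySem.List.mem_pyRange_one] at hy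
      simp only [in_rect, Bool.not_eq_eq_eq_not, Bool.not_true]
      refine Bool.not_eq_true _ ▸ ?_
      simp only [Bool.and_eq_true, decide_eq_true_eq]
      omega
    have hc : (!(in_rect (a + 1, c + 1, b - a - 1, d - c - 1) x c)) = true := by
      simp only [in_rect, Bool.not_eq_true', Bool.and_eq_false_iff, decide_eq_false_iff_not]
      omega
    have hd : (!(in_rect (a + 1, c + 1, b - a - 1, d - c - 1) x d)) = true := by
      simp only [in_rect, Bool.not_eq_true', Bool.and_eq_false_iff, decide_eq_false_iff_not]
      omega
    simp [List.filter_append, hmidnil, hc, hd, h]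

-- the grid scan, written over arbitrary ordered corners, equals B's three segments
lemma core (a b c d : Int) (hab : a ≤ b) (hcd : c ≤ d) :
    (PySem.List.pyRange a (b + 1) 1).flatMap (fun x =>
      ((PySem.List.pyRange c (d + 1) 1).filter
          (fun y => !(in_rect (a + 1, c + 1, b - a - 1, d - c - 1) x y))).map (fun y => (x, y)))
    = (if a = b then (PySem.List.pyRange c (d + 1) 1).map (fun y => (a, y))
       else
        (PySem.List.pyRange c (d + 1) 1).map (fun y => (a, y))
        ++ (PySem.List.pyRange (a + 1) b 1).flatMap
             (fun x => (if c = d then [c] else [c, d]).map (fun y => (x, y)))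
        ++ (PySem.List.pyRange c (d + 1) 1).map (fun y => (b, y))) := by
  by_cases h : a = b
  · subst h
    rw [if_pos rfl, PySem.List.pyRange_one_singleton, List.flatMap_cons, List.flatMap_nil,
        List.append_nil, filter_full a a c d a (Or.inl le_rfl)]
  · rw [if_neg h,
        show PySem.List.pyRange a (b + 1) 1 = a :: (PySem.List.pyRange (a + 1) b 1 ++ [b]) from by
          rw [PySem.List.pyRange_one_cons (a := a) (b := b + 1) (by omega),
              PySem.List.pyRange_one_succ_right (by omega)]]
    rw [List.flatMap_cons, List.flatMap_append, List.flatMap_cons, List.flatMap_nil]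
    rw [filter_full a b c d a (Or.inl le_rfl), filter_full a b c d b (Or.inr le_rfl)]
    have hmid : ∀ x ∈ PySem.List.pyRange (a + 1) b 1,
        ((PySem.List.pyRange c (d + 1) 1).filter
            (fun y => !(in_rect (a + 1, c + 1, b - a - 1, d - c - 1) x y))).map (fun y => (x, y))
          = (if c = d then [c] else [c, d]).map (fun y => (x, y)) := by
      intro x hx
      rw [PySem.List.mem_pyRange_one] at hx
      rw [filter_interior a b c d x (by omega) (by omega) hcd]
    rw [List.flatMap_congr hmid]
    simp [List.append_assoc]

-- min/max versus the conditional swap in B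
lemma swap_eq (u v : Int) : (if u ≤ v then (u, v) else (v, u)) = (min u v, max u v) := by
  split_ifs with h
  · rw [min_eq_left h, max_eq_right h]
  · rw [min_eq_right (by omega), max_eq_left (by omega)]

-- ===== VERDICT (by name: the statement is the Claim_ definition above) =====
theorem hollow_box_spec : Claim_equal_hollow_box := by
  intro x1 y1 x2 y2 _
  show hollow_box x1 y1 x2 y2 = hollow_box_alt x1 y1 x2 y2
  unfold hollow_box hollow_box_alt
  rw [swap_eq x1 x2, swap_eq y1 y2]
  exact core (min x1 x2) (max x1 x2) (min y1 y2) (max y1 y2)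
    (min_le_max) (min_le_max)
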